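-- pv_equiv track=rewrite | github.com/pedrotst/MewtwoProject | Pokedex/Pages/lerarquivo.py | trabalharUrl
-- ===== SOURCE A (Python) =====
-- def trabalharUrl(url):
-- 	string = '';
-- 	true = 1;
-- 	false = 0;
-- 	tipo = false;
-- 	cont = 0;
-- 	ponto = false
-- 	for c in url:
-- 		if (c == '/'):
-- 			cont+=1;
-- 		elif (c == '.'):
-- 			ponto = true;
-- 		elif (cont == 2 and ponto == false):
-- 			string += c;
-- 	return string.capitalize();
-- ===== SOURCE B (Python) =====
-- def trabalharUrl(url):
--     dot = url.find('.')
--     pre = url if dot == -1 else url[:dot]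
--     i = pre.find('/')
--     if i == -1:
--         return ''
--     j = pre.find('/', i + 1)
--     if j == -1:
--         return ''
--     k = pre.find('/', j + 1)
--     seg = pre[j + 1:] if k == -1 else pre[j + 1:k]
--     return seg.capitalize()
-- ===== Notes on version B (the rewrite author's own statement) =====
-- stated objective: faster
-- what changed: Replaces the char-by-char Python scan with slash-counter and dot-flag state by index arithmetic: truncate at the first dot via find/slice, locate the 2nd and 3rd slashes with find, and slice the segment between them.
import Mathlib
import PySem

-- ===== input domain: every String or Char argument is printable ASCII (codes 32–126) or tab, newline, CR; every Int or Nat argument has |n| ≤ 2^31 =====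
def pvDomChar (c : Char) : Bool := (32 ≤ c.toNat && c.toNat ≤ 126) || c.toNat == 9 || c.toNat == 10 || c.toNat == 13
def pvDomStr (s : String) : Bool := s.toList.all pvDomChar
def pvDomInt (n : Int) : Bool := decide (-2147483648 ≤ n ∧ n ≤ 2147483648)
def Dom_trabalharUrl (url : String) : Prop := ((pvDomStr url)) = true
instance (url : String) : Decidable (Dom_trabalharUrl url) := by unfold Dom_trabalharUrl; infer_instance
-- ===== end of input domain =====

-- B replaces A's char-by-char scan (slash counter + dot flag) with index arithmetic:
-- truncate at the first dot, find the 2nd/3rd slashes, slice the segment between them.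

-- shared helper: Python str.capitalize (first char uppercased, the rest lowercased) —
-- exact on this file's ASCII domain; both A and B end with .capitalize()
def pyCapitalize : List Char → List Char
  | [] => []
  | c :: t => PySem.Chars.upperChar c :: t.map PySem.Chars.lowerChar

-- ===== PORT A =====
-- literal transliteration: state (string, cont, ponto); true=1/false=0 as in the
-- source (the source's 'tipo' is assigned once and never read, so it is omitted)
def trabalharUrl (url : String) : String :=
  let step : (List Char × Int × Int) → Char → (List Char × Int × Int) :=
    fun st c =>
      let (string, cont, ponto) := st
      if c = '/' then (string, cont + 1, ponto)
      else if c = '.' then (string, cont, 1)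
      else if cont = 2 ∧ ponto = 0 then (string ++ [c], cont, ponto)
      else (string, cont, ponto)
  let st := url.toList.foldl step ([], 0, 0)
  String.ofList (pyCapitalize st.1)

-- ===== PORT B =====
def trabalharUrl_alt (url : String) : String :=
  let dot := PySem.Str.find url "."
  let pre := if dot = -1 then url else PySem.Str.slice url none (some dot)
  let i := PySem.Str.find pre "/"
  if i = -1 then "" else
  let j := PySem.Str.findFrom pre "/" (i + 1)
  if j = -1 then "" else
  let k := PySem.Str.findFrom pre "/" (j + 1)
  let seg := if k = -1 then PySem.Str.slice pre (some (j + 1)) none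
             else PySem.Str.slice pre (some (j + 1)) (some k)
  String.ofList (pyCapitalize seg.toList)

-- ===== PRECONDITION & SPEC =====
def Spec_trabalharUrl (url : String) (out : String) : Prop := out = trabalharUrl_alt url
instance (url : String) (out : String) : Decidable (Spec_trabalharUrl url out) := by unfold Spec_trabalharUrl; infer_instance

-- ===== CLAIM (what is proved, stated in full; the proofs are below) =====
def Claim_equal_trabalharUrl : Prop := ∀ (url : String), Dom_trabalharUrl url → Spec_trabalharUrl url (trabalharUrl url)

-- ===== LEMMAS AND PROOFS =====

def auxD : List Char → Int → List Char
  | [], _ => []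
  | c :: cs, cont =>
    if c = '/' then auxD cs (cont + 1)
    else if c = '.' then []
    else if cont = 2 then c :: auxD cs cont
    else auxD cs cont
def auxN : List Char → Int → List Char
  | [], _ => []
  | c :: cs, cont =>
    if c = '/' then auxN cs (cont + 1)
    else if cont = 2 then c :: auxN cs cont
    else auxN cs cont

theorem foldA_eq (cs : List Char) : ∀ (s : List Char) (cont ponto : Int),
    (cs.foldl (fun st c =>
      let (string, cont, ponto) := st
      if c = '/' then (string, cont + 1, ponto)
      else if c = '.' then (string, cont, 1)
      else if cont = 2 ∧ ponto = 0 then (string ++ [c], cont, ponto)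
      else (string, cont, ponto)) (s, cont, ponto)).1
      = s ++ (if ponto = 0 then auxD cs cont else []) := by
  induction cs with
  | nil => intro s cont ponto; simp [auxD]
  | cons c cs ih =>
    intro s cont ponto
    simp only [List.foldl_cons, auxD]
    by_cases h1 : c = '/'
    · simp [h1, ih]
    · by_cases h2 : c = '.'
      · simp [h1, h2, ih]
      · by_cases h3 : cont = 2
        · by_cases h4 : ponto = 0
          · simp [h1, h2, h3, h4, ih]
          · simp [h1, h2, h3, h4, ih]
        · simp [h1, h2, h3, ih]

theorem auxD_eq (cs : List Char) : ∀ cont : Int,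
    auxD cs cont = auxN (cs.takeWhile (· ≠ '.')) cont := by
  induction cs with
  | nil => intro cont; simp [auxD, auxN]
  | cons c cs ih =>
    intro cont
    by_cases h2 : c = '.'
    · simp [auxD, h2, auxN]
    · by_cases h1 : c = '/'
      · simp [auxD, auxN, h1, h2, List.takeWhile_cons, ih]
      · simp [auxD, auxN, h1, h2, List.takeWhile_cons, ih]

theorem auxN_gt2 (cs : List Char) : ∀ cont : Int, 2 < cont → auxN cs cont = [] := by
  induction cs with
  | nil => intro cont _; simp [auxN]
  | cons c cs ih =>
    intro cont h
    by_cases h1 : c = '/'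
    · simp only [auxN, if_pos h1]; exact ih _ (by omega)
    · simp only [auxN, if_neg h1, if_neg (by omega : ¬ cont = 2)]; exact ih _ h

theorem auxN_two (cs : List Char) : auxN cs 2 = cs.takeWhile (· ≠ '/') := by
  induction cs with
  | nil => simp [auxN]
  | cons c cs ih =>
    by_cases h1 : c = '/'
    · simp [auxN, h1, List.takeWhile_cons, auxN_gt2 cs 3 (by omega)]
    · simp [auxN, h1, List.takeWhile_cons, ih]

theorem auxN_step (cs : List Char) : ∀ cont : Int, cont ≠ 2 →
    auxN cs cont = auxN ((cs.dropWhile (· ≠ '/')).drop 1) (cont + 1) := by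
  induction cs with
  | nil => intro cont _; simp [auxN]
  | cons c cs ih =>
    intro cont h
    by_cases h1 : c = '/'
    · simp [auxN, h1, List.dropWhile_cons]
    · simp [auxN, h1, h, List.dropWhile_cons, ih _ h]

theorem infix_singleton {x : Char} {l : List Char} : [x] <:+: l ↔ x ∈ l := by
  constructor
  · intro h; exact h.subset (by simp)
  · intro h
    obtain ⟨s, t, rfl⟩ := List.append_of_mem h
    exact ⟨s, t, by simp⟩

theorem find_single_neg {l : List Char} {c : Char} (h : PySem.Chars.find l [c] = -1) :
    l.takeWhile (· ≠ c) = l ∧ l.dropWhile (· ≠ c) = [] := by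
  rw [PySem.Chars.find_eq_neg_one_iff, infix_singleton] at h
  constructor
  · exact List.takeWhile_eq_self_iff.mpr (by intro x hx; simp; rintro rfl; exact h hx)
  · exact List.dropWhile_eq_nil_iff.mpr (by intro x hx; simp; rintro rfl; exact h hx)

theorem takeDrop_at {c : Char} : ∀ (l : List Char) (n : Nat), ∀ (hn : n < l.length),
    (∀ i, (hi : i < l.length) → i < n → l[i] ≠ c) → l[n] = c →
    l.takeWhile (· ≠ c) = l.take n ∧ l.dropWhile (· ≠ c) = l.drop n := by
  intro l
  induction l with
  | nil => intro n h; simp at h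
  | cons x t ih =>
    intro n hn hmin hx
    cases n with
    | zero => simp at hx; simp [List.takeWhile_cons, List.dropWhile_cons, hx]
    | succ m =>
      have hx0 : x ≠ c := by
        have := hmin 0 (by simp) (by omega); simpa using this
      have := ih m (by simpa using hn) (fun i hi him => by
        have := hmin (i+1) (by simpa using hi) (by omega); simpa using this) (by simpa using hx)
      simp only [List.takeWhile_cons, List.dropWhile_cons, hx0, decide_not] at this ⊢
      simp [hx0, this.1, this.2]


theorem find_single_pos {l : List Char} {c : Char} (h : PySem.Chars.find l [c] ≠ -1) :
    0 ≤ PySem.Chars.find l [c] ∧ (PySem.Chars.find l [c]).toNat < l.length ∧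
    l.take (PySem.Chars.find l [c]).toNat = l.takeWhile (· ≠ c) ∧
    l.drop (PySem.Chars.find l [c]).toNat = l.dropWhile (· ≠ c) := by
  have hmem : c ∈ l := by
    by_contra hm
    exact h ((PySem.Chars.find_eq_neg_one_iff l [c]).mpr (fun hi => hm (infix_singleton.mp hi)))
  have h0 : 0 ≤ PySem.Chars.find l [c] :=
    (PySem.Chars.find_nonneg_iff l [c]).mpr (infix_singleton.mpr hmem)
  obtain ⟨hpre, hmin⟩ := PySem.Chars.find_spec h0
  set n := (PySem.Chars.find l [c]).toNat with hn
  have hlt : n < l.length := by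
    rcases hpre with ⟨t, ht⟩
    have hl : (l.drop n).length = (c :: t).length := by rw [← ht]; simp
    simp at hl
    omega
  have hgc : l[n]'hlt = c := by
    have hd := List.drop_eq_getElem_cons hlt
    rw [hd] at hpre
    rcases hpre with ⟨t, ht⟩
    simp only [List.cons_append, List.nil_append] at ht
    exact (List.cons_eq_cons.mp ht.symm).1
  have hm : ∀ i, (hi : i < l.length) → i < n → l[i] ≠ c := by
    intro i hi hin hci
    apply hmin i hin
    rw [List.drop_eq_getElem_cons hi, hci]
    exact ⟨_, rfl⟩
  obtain ⟨h1, h2⟩ := takeDrop_at l n hlt hm hgc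
  exact ⟨h0, hlt, h1.symm, h2.symm⟩

-- B's core index computation, on lists
def bCore (p : List Char) : List Char :=
  let i := PySem.Chars.find p ['/']
  if i = -1 then [] else
  let j := PySem.Chars.findFrom p ['/'] (i + 1)
  if j = -1 then [] else
  let k := PySem.Chars.findFrom p ['/'] (j + 1)
  if k = -1 then PySem.Chars.slice p (some (j + 1)) none
  else PySem.Chars.slice p (some (j + 1)) (some k)


theorem B_core_eq (p : List Char) : bCore p = auxN p 0 := by
  unfold bCore
  simp only []
  by_cases hi : PySem.Chars.find p ['/'] = -1
  · rw [if_pos hi, auxN_step p 0 (by omega), (find_single_neg hi).2]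
    simp [auxN]
  · rw [if_neg hi]
    obtain ⟨h0, hlt, htake, hdrop⟩ := find_single_pos hi
    set i := PySem.Chars.find p ['/'] with hidef
    have hi1 : i + 1 = ((i.toNat + 1 : Nat) : Int) := by
      push_cast [Int.toNat_of_nonneg h0]; ring
    set q : List Char := p.drop (i.toNat + 1) with hq
    have hq' : q = (p.dropWhile (· ≠ '/')).drop 1 := by
      rw [← hdrop, List.drop_drop]
    have hA0 : auxN p 0 = auxN q 1 := by
      rw [auxN_step p 0 (by omega), ← hq']; norm_num
    rw [hi1, PySem.Chars.findFrom_natCast p ['/'] (i.toNat + 1) (by omega)]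
    by_cases hj0 : PySem.Chars.find q ['/'] = -1
    · rw [← hq, if_pos hj0, if_pos rfl, hA0, auxN_step q 1 (by omega),
        (find_single_neg hj0).2]
      simp [auxN]
    · rw [← hq, if_neg hj0]
      obtain ⟨j0, jlt, jtake, jdrop⟩ := find_single_pos hj0
      set m := PySem.Chars.find q ['/'] with hmdef
      have hjval : ((i.toNat + 1 : Nat) : Int) + m ≠ -1 := by omega
      rw [if_neg hjval]
      set j : Int := ((i.toNat + 1 : Nat) : Int) + m with hjdef
      have hjnn : 0 ≤ j := by omega
      have hj1 : j + 1 = ((i.toNat + 1 + m.toNat + 1 : Nat) : Int) := by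
        omega
      have hqlen : q.length = p.length - (i.toNat + 1) := by simp [hq]
      set r : List Char := p.drop (i.toNat + 1 + m.toNat + 1) with hr
      have hr' : r = (q.dropWhile (· ≠ '/')).drop 1 := by
        rw [← jdrop, List.drop_drop, hq, List.drop_drop]
        congr 1
      have hA1 : auxN q 1 = r.takeWhile (· ≠ '/') := by
        rw [auxN_step q 1 (by omega), ← hr']; norm_num [auxN_two]
      have hrlen : j.toNat + 1 = i.toNat + 1 + m.toNat + 1 := by
        omega
      rw [hj1, PySem.Chars.findFrom_natCast p ['/'] (i.toNat + 1 + m.toNat + 1) (by omega)]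
      rw [← (show r = p.drop (i.toNat + 1 + m.toNat + 1) from hr)]
      by_cases hk0 : PySem.Chars.find r ['/'] = -1
      · rw [if_pos hk0, if_pos rfl]
        show PySem.Chars.slice p (some ((i.toNat + 1 + m.toNat + 1 : Nat) : Int)) none = auxN p 0
        simp only [PySem.Chars.slice]
        rw [hA0, hA1, PySem.List.slice_from p (by omega : (0:Int) ≤ ((i.toNat + 1 + m.toNat + 1 : Nat) : Int))]
        simp only [Int.toNat_natCast]
        rw [(find_single_neg hk0).1, ← hr]
      · rw [if_neg hk0]
        obtain ⟨k0, klt, ktake, kdrop⟩ := find_single_pos hk0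
        set w := PySem.Chars.find r ['/'] with hwdef
        rw [if_neg (by omega : ¬ ((i.toNat + 1 + m.toNat + 1 : Nat) : Int) + w = -1)]
        show PySem.Chars.slice p (some ((i.toNat + 1 + m.toNat + 1 : Nat) : Int)) (some (((i.toNat + 1 + m.toNat + 1 : Nat) : Int) + w)) = auxN p 0
        simp only [PySem.Chars.slice]
        rw [hA0, hA1, PySem.List.slice_toNat p (by omega : (0:Int) ≤ ((i.toNat + 1 + m.toNat + 1 : Nat) : Int)) (by omega : (0:Int) ≤ ((i.toNat + 1 + m.toNat + 1 : Nat) : Int) + w)]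
        simp only [Int.toNat_natCast]
        have e2 : ((((i.toNat + 1 + m.toNat + 1 : Nat) : Int) + w)).toNat - (i.toNat + 1 + m.toNat + 1) = w.toNat := by omega
        rw [e2, ← hr, ktake]

theorem pre_eq (url : String) :
    (if PySem.Str.find url "." = -1 then url
     else PySem.Str.slice url none (some (PySem.Str.find url "."))).toList
    = url.toList.takeWhile (· ≠ '.') := by
  have hdot : ("." : String).toList = ['.'] := rfl
  by_cases h : PySem.Str.find url "." = -1
  · rw [if_pos h]
    rw [PySem.Str.find_eq, hdot] at h
    exact (find_single_neg h).1.symm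
  · rw [if_neg h, PySem.Str.toList_slice]
    rw [PySem.Str.find_eq, hdot] at h ⊢
    obtain ⟨h0, hlt, htake, hdrop⟩ := find_single_pos h
    simp only [PySem.Chars.slice]
    rw [PySem.List.slice_to url.toList h0, htake]

theorem alt_eq (url : String) :
    trabalharUrl_alt url = String.ofList (pyCapitalize (bCore (url.toList.takeWhile (· ≠ '.')))) := by
  have hslash : ("/" : String).toList = ['/'] := rfl
  unfold trabalharUrl_alt bCore
  simp only []
  set pre := (if PySem.Str.find url "." = -1 then url
     else PySem.Str.slice url none (some (PySem.Str.find url "."))) with hpredef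
  have hpre : pre.toList = url.toList.takeWhile (· ≠ '.') := pre_eq url
  rw [← hpre]
  rw [PySem.Str.find_eq pre "/", hslash]
  by_cases hi : PySem.Chars.find pre.toList ['/'] = -1
  · rw [if_pos hi, if_pos hi]; rfl
  · rw [if_neg hi, if_neg hi, PySem.Str.findFrom_eq, hslash]
    by_cases hj : PySem.Chars.findFrom pre.toList ['/'] (PySem.Chars.find pre.toList ['/'] + 1) none = -1
    · rw [if_pos hj, if_pos hj]; rfl
    · rw [if_neg hj, if_neg hj, PySem.Str.findFrom_eq, hslash]
      by_cases hk : PySem.Chars.findFrom pre.toList ['/']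
          (PySem.Chars.findFrom pre.toList ['/'] (PySem.Chars.find pre.toList ['/'] + 1) none + 1) none = -1
      · rw [if_pos hk, if_pos hk, PySem.Str.toList_slice]
      · rw [if_neg hk, if_neg hk, PySem.Str.toList_slice]

theorem A_eq (url : String) :
    trabalharUrl url = String.ofList (pyCapitalize (auxN (url.toList.takeWhile (· ≠ '.')) 0)) := by
  unfold trabalharUrl
  simp only []
  rw [foldA_eq url.toList [] 0 0]
  simp only [List.nil_append, if_true, decide_eq_true_eq]
  rw [auxD_eq url.toList 0]

-- ===== VERDICT (by name: the statement is the Claim_ definition above) =====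
theorem trabalharUrl_spec : Claim_equal_trabalharUrl := by
  intro url _
  unfold Spec_trabalharUrl
  rw [A_eq url, alt_eq url, B_core_eq]
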